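-- pv_equiv track=rewrite | github.com/iamabhi6345/DSA | oa/q1.py | largestSumCycle
-- ===== SOURCE A (Python) =====
-- def largestSumCycle( N, Edge):
--         # Initialize the visited array to keep track of visited nodes
--         v = [-1] * N
--
--         def visit(i: int, s: int) -> int:
--             if Edge[i] < 0:
--                 return -1
--             if v[i] >= 0:
--                 # Return the sum of the cycle
--                 return s + i - v[i]
--
--             v[i] = s + i
--             result = visit(Edge[i], s + i)
--
--             Edge[i] = -1
--             return result
--
--         return max(visit(i, 0) for i in range(N))
-- ===== SOURCE B (Python) =====
-- def largestSumCycle(N, Edge):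
--     # Different algorithm: no mutation of Edge (A sets walked entries to -1 in
--     # place; equivalence is about the return value only).  A global `done` set
--     # replaces the mask, and a per-walk dict of prefix sums replaces the v array.
--     done = set()
--     results = []
--     for start in range(N):
--         pos = {}          # node -> running sum when first reached in this walk
--         i, acc, found = start, 0, -1
--         while True:
--             if Edge[i] < 0 or i in done:
--                 break
--             if i in pos:
--                 found = acc - pos[i]
--                 break
--             pos[i] = acc
--             acc += i
--             i = Edge[i]
--         done.update(pos)
--         results.append(found)
--     return max(results)
-- ===== Notes on version B (the rewrite author's own statement) =====
-- stated objective: alternative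
-- what changed: A's recursive DFS that marks progress by mutating the Edge list and a global v array is replaced by an iterative walk that never touches Edge: a global 'done' hash set stands in for the Edge[j]=-1 mask and a fresh per-walk dict of running prefix sums replaces the v array, the cycle sum being a difference of prefix sums.
import Mathlib
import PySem

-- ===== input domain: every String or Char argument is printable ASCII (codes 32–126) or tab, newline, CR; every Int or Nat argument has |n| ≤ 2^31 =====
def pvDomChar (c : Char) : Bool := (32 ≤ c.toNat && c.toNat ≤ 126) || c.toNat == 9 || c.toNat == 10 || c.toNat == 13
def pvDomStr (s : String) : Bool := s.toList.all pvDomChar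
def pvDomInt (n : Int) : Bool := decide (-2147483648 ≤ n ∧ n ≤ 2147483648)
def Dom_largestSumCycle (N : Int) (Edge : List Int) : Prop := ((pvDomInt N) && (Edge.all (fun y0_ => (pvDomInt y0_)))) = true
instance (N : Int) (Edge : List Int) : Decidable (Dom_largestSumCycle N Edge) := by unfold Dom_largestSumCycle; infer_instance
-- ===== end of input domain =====

-- B replaces A's recursive DFS (which marks progress by mutating Edge and a v
-- array) by an iterative walk over the UNTOUCHED Edge list, with a global
-- `done` hash set standing in for A's Edge[j] = -1 mask and a per-walk dict of
-- running prefix sums replacing v.  A mutates its Edge argument in place and B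
-- does not: the equivalence proved here is about the RETURN value only.

-- ===== PORT A =====
-- A's recursive visit, threading the mutable state (v, Edge); returns
-- (result, v', Edge').  Fuel only makes the recursion structural: inside Pre_
-- the recursion depth is at most N+1 (each recursive step marks a fresh v
-- entry, at most N of them), so with fuel N.toNat+Edge.length+1 the fuel-out
-- branch is never reached.
-- The `none` branches of pyGet? are Python IndexErrors, excluded by Pre_.
def pvVisitA (fuel : Nat) (i s : Int) (v e : List Int) : Int × List Int × List Int :=
  match fuel with
  | 0 => (-1, v, e)
  | f + 1 =>
    match PySem.List.pyGet? e i with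
    | none => (-1, v, e)                      -- IndexError (outside Pre_)
    | some ei =>
      if ei < 0 then (-1, v, e)
      else
        match PySem.List.pyGet? v i with
        | none => (-1, v, e)                  -- IndexError (outside Pre_)
        | some vi =>
          if vi ≥ 0 then (s + i - vi, v, e)
          else
            let v1 := v.set i.toNat (s + i)   -- v[i] = s + i  (i ≥ 0 whenever reached)
            let t := pvVisitA f ei (s + i) v1 e
            (t.1, t.2.1, t.2.2.set i.toNat (-1))   -- Edge[i] = -1 on unwinding

def largestSumCycle (N : Int) (Edge : List Int) : Int :=
  let t := (PySem.List.pyRange 0 N 1).foldl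
    (fun (acc : List Int × List Int × List Int) i =>
      let r := pvVisitA (N.toNat + Edge.length + 1) i 0 acc.2.1 acc.2.2
      (acc.1 ++ [r.1], r.2.1, r.2.2))
    ([], List.replicate N.toNat (-1), Edge)
  (PySem.List.max? t.1 (fun x => x)).getD 0                -- max([]) is a ValueError (outside Pre_)

-- ===== PORT B =====
-- B's while-loop: follow i = Edge[i] on the ORIGINAL Edge list, exiting with
-- -1 on a negative edge or a globally `done` node, and with the difference of
-- running prefix sums acc - pos[i] when the walk re-reaches a node of the
-- current walk; returns (found, pos).  Fuel N.toNat+Edge.length+1 covers the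
-- loop: every iteration that continues inserts a fresh valid index into pos.
def pvWalkB (fuel : Nat) (Edge : List Int) (done : PySem.Set Int)
    (pos : PySem.Dict Int Int) (i acc : Int) : Int × PySem.Dict Int Int :=
  match fuel with
  | 0 => (-1, pos)
  | f + 1 =>
    match PySem.List.pyGet? Edge i with
    | none => (-1, pos)                       -- IndexError (outside Pre_)
    | some ei =>
      if ei < 0 ∨ i ∈ done then (-1, pos)     -- break with found = -1
      else
        match PySem.Dict.get? pos i with
        | some p => (acc - p, pos)            -- found = acc - pos[i]
        | none => pvWalkB f Edge done (PySem.Dict.insert pos i acc) ei (acc + i)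

def largestSumCycle_alt (N : Int) (Edge : List Int) : Int :=
  let t := (PySem.List.pyRange 0 N 1).foldl
    (fun (st : List Int × PySem.Set Int) start =>
      let w := pvWalkB (N.toNat + Edge.length + 1) Edge st.2 PySem.Dict.empty start 0
      (st.1 ++ [w.1], PySem.Set.update st.2 (PySem.Dict.keys w.2)))   -- done.update(pos)
    ([], PySem.Set.empty)
  (PySem.List.max? t.1 (fun x => x)).getD 0                -- max([]) is a ValueError (outside Pre_)

-- ===== PRECONDITION & SPEC =====
-- Exactly the inputs on which A returns normally: N ≤ 0 is a ValueError from
-- max(); with N > len(Edge) some start raises IndexError on Edge[start]; an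
-- edge value x of the first N nodes must lead either to a node x < N (the walk
-- continues there) or to a node with Edge[x] < 0 (the walk stops with -1) —
-- otherwise A raises IndexError on v[x] or Edge[x].
def Pre_largestSumCycle (N : Int) (Edge : List Int) : Prop :=
  0 < N ∧ N ≤ Edge.length ∧
    ∀ x ∈ Edge.take N.toNat,
      x < N ∨ (x < Edge.length ∧ (PySem.List.pyGet? Edge x).getD 0 < 0)
instance (N : Int) (Edge : List Int) : Decidable (Pre_largestSumCycle N Edge) := by
  unfold Pre_largestSumCycle; infer_instance

def pvWitness_largestSumCycle : Int × List Int := (4, [1, 2, 0, 2])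

def Spec_largestSumCycle (N : Int) (Edge : List Int) (out : Int) : Prop := out = largestSumCycle_alt N Edge
instance (N : Int) (Edge : List Int) (out : Int) : Decidable (Spec_largestSumCycle N Edge out) := by unfold Spec_largestSumCycle; infer_instance

-- ===== CLAIM (what is proved, stated in full; the proofs are below) =====
def Claim_equal_largestSumCycle : Prop := ∀ (N : Int) (Edge : List Int), Dom_largestSumCycle N Edge → Pre_largestSumCycle N Edge → Spec_largestSumCycle N Edge (largestSumCycle N Edge)

-- ===== LEMMAS AND PROOFS =====

-- keys freshly inserted by the walk (present in pos', absent from pos)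
def pvNewK (pos pos' : PySem.Dict Int Int) (k : Int) : Prop :=
  (PySem.Dict.get? pos' k).isSome ∧ ¬ (PySem.Dict.get? pos k).isSome

-- A's current Edge list is the original one masked to -1 at the done nodes
def pvInvE (Edge0 e : List Int) (done : List Int) : Prop :=
  ∀ j : Nat, e[j]? = if (j : Int) ∈ done then Edge0[j]?.map (fun _ => (-1 : Int)) else Edge0[j]?

-- A's v array classifies nodes: nonneg entries are exactly done ∪ pos keys,
-- and on a pos key the entry is the stored prefix sum plus the node index
def pvInvV (v : List Int) (done : List Int) (pos : PySem.Dict Int Int) : Prop :=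
  ∀ (j : Nat) (x : Int), v[j]? = some x →
    ((0 ≤ x ↔ ((j : Int) ∈ done ∨ (PySem.Dict.get? pos (j : Int)).isSome)) ∧
     ∀ p, PySem.Dict.get? pos (j : Int) = some p → x = p + (j : Int))

-- a node either indexes v or its out-edge is negative (the walk exits there)
def pvNodeOK (n : Nat) (e : List Int) (i : Int) : Prop :=
  i.toNat < n ∨ ∀ x, PySem.List.pyGet? e i = some x → x < 0

-- every nonnegative edge of a node < n leads to an OK node (from Pre_)
def pvClosed (n : Nat) (e : List Int) : Prop :=
  ∀ j : Nat, j < n → ∀ x, e[j]? = some x → 0 ≤ x → pvNodeOK n e x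

lemma pvLtOfSome {l : List Int} {j : Nat} {x : Int} (h : l[j]? = some x) : j < l.length := by
  by_contra hh
  rw [List.getElem?_eq_none_iff.mpr (by omega)] at h
  simp at h

lemma pvPre_closed (N : Int) (Edge0 : List Int) (h : Pre_largestSumCycle N Edge0)
    (e done : List Int) (hE : pvInvE Edge0 e done) : pvClosed N.toNat e := by
  obtain ⟨hN0, hNlen, hmem⟩ := h
  intro j hj x hx hx0
  have hEj := hE j
  by_cases hd : (j : Int) ∈ done
  · rw [hEj, if_pos hd] at hx
    obtain ⟨y, hy, hyx⟩ := Option.map_eq_some_iff.mp hx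
    omega
  · rw [hEj, if_neg hd] at hx
    have hxmem : x ∈ Edge0.take N.toNat := by
      apply List.mem_of_getElem? (i := j)
      simp [hj, hx]
    rcases hmem x hxmem with hlt | ⟨hxlen, hneg⟩
    · exact Or.inl (by omega)
    · refine Or.inr (fun y hy => ?_)
      rw [PySem.List.pyGet?_of_nonneg e hx0] at hy
      have hEx := hE x.toNat
      rw [Int.toNat_of_nonneg hx0] at hEx
      by_cases hxd : x ∈ done
      · rw [hEx, if_pos hxd] at hy
        obtain ⟨z, hz, hzy⟩ := Option.map_eq_some_iff.mp hy
        omega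
      · rw [hEx, if_neg hxd] at hy
        have hgy : PySem.List.pyGet? Edge0 x = some y := by
          rw [PySem.List.pyGet?_of_nonneg Edge0 hx0]; exact hy
        rw [hgy] at hneg
        exact hneg

-- one walk of B simulates one recursive visit of A
lemma pvWalk_sim (Edge0 : List Int) (fuel : Nat) (i s : Int) (v e : List Int)
    (done : PySem.Set Int) (pos : PySem.Dict Int Int)
    (hi : 0 ≤ i) (hs : 0 ≤ s)
    (hE : pvInvE Edge0 e done) (hV : pvInvV v done pos)
    (hN : pvNodeOK v.length e i) (hC : pvClosed v.length e) :
    (pvVisitA fuel i s v e).1 = (pvWalkB fuel Edge0 done pos i s).1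
    ∧ (pvVisitA fuel i s v e).2.1.length = v.length
    ∧ (pvVisitA fuel i s v e).2.2.length = e.length
    ∧ (∀ j : Nat, ¬ pvNewK pos (pvWalkB fuel Edge0 done pos i s).2 (j : Int) →
        (pvVisitA fuel i s v e).2.1[j]? = v[j]? ∧ (pvVisitA fuel i s v e).2.2[j]? = e[j]?)
    ∧ (∀ j : Nat, pvNewK pos (pvWalkB fuel Edge0 done pos i s).2 (j : Int) →
        (∃ x, (pvVisitA fuel i s v e).2.1[j]? = some x ∧ 0 ≤ x)
          ∧ (pvVisitA fuel i s v e).2.2[j]? = some (-1))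
    ∧ (∀ k, (PySem.Dict.get? pos k).isSome →
        (PySem.Dict.get? (pvWalkB fuel Edge0 done pos i s).2 k).isSome)
    ∧ (∀ k, pvNewK pos (pvWalkB fuel Edge0 done pos i s).2 k → 0 ≤ k) := by
  induction fuel generalizing i s v pos with
  | zero =>
    simp only [pvVisitA, pvWalkB]
    simp [pvNewK]
    refine ⟨fun j h1 h2 => absurd h1 (by rw [h2]; simp), fun k h1 h2 => absurd h1 (by rw [h2]; simp)⟩
  | succ f ih =>
    simp only [pvVisitA, pvWalkB]
    have hti : ((i.toNat : Int)) = i := Int.toNat_of_nonneg hi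
    have hEi := hE i.toNat
    rw [hti] at hEi
    have hpe : PySem.List.pyGet? e i = e[i.toNat]? := PySem.List.pyGet?_of_nonneg e hi
    have hp0 : PySem.List.pyGet? Edge0 i = Edge0[i.toNat]? := PySem.List.pyGet?_of_nonneg Edge0 hi
    cases hge : Edge0[i.toNat]? with
    | none =>
      have hpeN : PySem.List.pyGet? e i = none := by
        rw [hpe, hEi, hge]; split <;> simp
      have hp0N : PySem.List.pyGet? Edge0 i = none := by rw [hp0, hge]
      simp only [hpeN, hp0N]
      simp [pvNewK]
      refine ⟨fun j h1 h2 => absurd h1 (by rw [h2]; simp), fun k h1 h2 => absurd h1 (by rw [h2]; simp)⟩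
    | some w =>
      have hp0S : PySem.List.pyGet? Edge0 i = some w := by rw [hp0, hge]
      by_cases hdone : i ∈ done
      · have hpeS : PySem.List.pyGet? e i = some (-1) := by
          rw [hpe, hEi, if_pos hdone, hge]; rfl
        simp only [hpeS, hp0S]
        rw [if_pos (by norm_num : (-1 : Int) < 0), if_pos (Or.inr hdone)]
        simp [pvNewK]
        refine ⟨fun j h1 h2 => absurd h1 (by rw [h2]; simp), fun k h1 h2 => absurd h1 (by rw [h2]; simp)⟩
      · have hpeS : PySem.List.pyGet? e i = some w := by
          rw [hpe, hEi, if_neg hdone, hge]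
        simp only [hpeS, hp0S]
        by_cases hw : w < 0
        · rw [if_pos hw, if_pos (Or.inl hw)]
          simp [pvNewK]
          refine ⟨fun j h1 h2 => absurd h1 (by rw [h2]; simp), fun k h1 h2 => absurd h1 (by rw [h2]; simp)⟩
        · rw [if_neg hw, if_neg (by tauto : ¬ (w < 0 ∨ i ∈ done))]
          have hlt : i.toNat < v.length := by
            rcases hN with h | h
            · exact h
            · exact absurd (h w hpeS) hw
          have hvi : v[i.toNat]? = some v[i.toNat] := List.getElem?_eq_getElem hlt
          have hvread : PySem.List.pyGet? v i = some v[i.toNat] := by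
            rw [PySem.List.pyGet?_of_nonneg v hi, hvi]
          simp only [hvread]
          have hcls := hV i.toNat v[i.toNat] hvi
          rw [hti] at hcls
          by_cases hpos : (PySem.Dict.get? pos i).isSome
          · obtain ⟨p, hp⟩ := Option.isSome_iff_exists.mp hpos
            have hvge : v[i.toNat] ≥ 0 := hcls.1.mpr (Or.inr hpos)
            rw [if_pos hvge]
            have hres : s + i - v[i.toNat] = s - p := by rw [hcls.2 p hp]; ring
            simp [hp, pvNewK, hres]
            refine ⟨fun j h1 h2 => absurd h1 (by rw [h2]; simp), fun k h1 h2 => absurd h1 (by rw [h2]; simp)⟩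
          · have hvlt : ¬ v[i.toNat] ≥ 0 := fun hge0 =>
              hpos ((hcls.1.mp hge0).resolve_left hdone)
            rw [if_neg hvlt]
            have hposN : PySem.Dict.get? pos i = none := Option.not_isSome_iff_eq_none.mp hpos
            simp only [hposN]
            have hwge : (0 : Int) ≤ w := not_lt.mp hw
            have heiN : e[i.toNat]? = some w := by rw [← hpe]; exact hpeS
            -- invariants for the recursive call
            have hV1 : pvInvV (v.set i.toNat (s + i)) done (PySem.Dict.insert pos i s) := by
              intro j x hx
              by_cases hji : j = i.toNat
              · subst hji
                rw [List.getElem?_set_eq_of_lt _ hlt] at hx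
                obtain rfl : s + i = x := by injection hx
                rw [hti]
                refine ⟨⟨fun _ => Or.inr (by rw [PySem.Dict.get?_insert_self]; rfl),
                        fun _ => by omega⟩, ?_⟩
                intro p hp
                rw [PySem.Dict.get?_insert_self] at hp
                obtain rfl : s = p := by injection hp
                rfl
              · have hne : (j : Int) ≠ i := by omega
                rw [List.getElem?_set_ne (show i.toNat ≠ j by omega)] at hx
                have hold := hV j x hx
                rw [PySem.Dict.get?_insert_of_ne _ _ hne]
                exact hold
            have hN1 : pvNodeOK (v.set i.toNat (s + i)).length e w := by
              rw [List.length_set]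
              exact hC i.toNat hlt w heiN hwge
            have hC1 : pvClosed (v.set i.toNat (s + i)).length e := by
              rw [List.length_set]; exact hC
            have ihh := ih w (s + i) (v.set i.toNat (s + i)) (PySem.Dict.insert pos i s)
              hwge (by omega) hV1 hN1 hC1
            obtain ⟨ih1, ih2, ih3, ihold, ihnew, ihmono, ihpos⟩ := ihh
            have hiIn : (PySem.Dict.get? (pvWalkB f Edge0 done (PySem.Dict.insert pos i s) w (s + i)).2 i).isSome := by
              apply ihmono
              rw [PySem.Dict.get?_insert_self]; rfl
            have hnewk_i : pvNewK pos (pvWalkB f Edge0 done (PySem.Dict.insert pos i s) w (s + i)).2 i := by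
              refine ⟨hiIn, ?_⟩
              rw [hposN]; simp
            refine ⟨ih1, ?_, ?_, ?_, ?_, ?_, ?_⟩
            · rw [ih2, List.length_set]
            · rw [List.length_set, ih3]
            · -- untouched entries
              intro j hj
              have hne : (j : Int) ≠ i := fun hji => hj (hji ▸ hnewk_i)
              have hj1 : ¬ pvNewK (PySem.Dict.insert pos i s)
                  (pvWalkB f Edge0 done (PySem.Dict.insert pos i s) w (s + i)).2 (j : Int) := by
                intro hk
                obtain ⟨hk1, hk2⟩ := hk
                exact hj ⟨hk1, by rwa [PySem.Dict.get?_insert_of_ne _ _ hne] at hk2⟩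
              obtain ⟨ho1, ho2⟩ := ihold j hj1
              constructor
              · rw [ho1, List.getElem?_set_ne (show i.toNat ≠ j by omega)]
              · rw [List.getElem?_set_ne (show i.toNat ≠ j by omega), ho2]
            · -- freshly walked entries
              intro j hj
              by_cases hji : (j : Int) = i
              · have hj1 : ¬ pvNewK (PySem.Dict.insert pos i s)
                    (pvWalkB f Edge0 done (PySem.Dict.insert pos i s) w (s + i)).2 (j : Int) := by
                  intro hk
                  rw [hji] at hk
                  exact hk.2 (by rw [PySem.Dict.get?_insert_self]; rfl)
                obtain ⟨ho1, ho2⟩ := ihold j hj1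
                have hjn : j = i.toNat := by omega
                constructor
                · refine ⟨s + i, ?_, by omega⟩
                  rw [ho1, hjn]
                  exact List.getElem?_set_eq_of_lt _ hlt
                · rw [hjn]
                  exact List.getElem?_set_eq_of_lt _ (by rw [ih3]; exact pvLtOfSome heiN)
              · have hj1 : pvNewK (PySem.Dict.insert pos i s)
                    (pvWalkB f Edge0 done (PySem.Dict.insert pos i s) w (s + i)).2 (j : Int) := by
                  refine ⟨hj.1, ?_⟩
                  rw [PySem.Dict.get?_insert_of_ne _ _ hji]
                  exact hj.2
                obtain ⟨⟨x, hx1, hx2⟩, ho2⟩ := ihnew j hj1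
                constructor
                · exact ⟨x, hx1, hx2⟩
                · rw [List.getElem?_set_ne (show i.toNat ≠ j by omega), ho2]
            · -- keys of pos only grow
              intro k hk
              apply ihmono
              by_cases hki : k = i
              · subst hki; rw [PySem.Dict.get?_insert_self]; rfl
              · rwa [PySem.Dict.get?_insert_of_ne _ _ hki]
            · -- new keys are nonnegative
              intro k hk
              by_cases hki : k = i
              · omega
              · apply ihpos k
                refine ⟨hk.1, ?_⟩
                rw [PySem.Dict.get?_insert_of_ne _ _ hki]
                exact hk.2

-- the two outer folds produce the same result list
lemma pvFold_sim (Edge0 : List Int) (fuel : Nat) (n : Nat)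
    (hCP : ∀ e' done' : List Int, pvInvE Edge0 e' done' → pvClosed n e') :
    ∀ (l res v e : List Int) (done : PySem.Set Int),
    v.length = n →
    (∀ st ∈ l, 0 ≤ st ∧ st.toNat < n) →
    pvInvE Edge0 e done →
    pvInvV v done PySem.Dict.empty →
    (l.foldl (fun acc i =>
        let r := pvVisitA fuel i 0 acc.2.1 acc.2.2
        (acc.1 ++ [r.1], r.2.1, r.2.2)) (res, v, e)).1
      = (l.foldl (fun st start =>
          let w := pvWalkB fuel Edge0 st.2 PySem.Dict.empty start 0
          (st.1 ++ [w.1], PySem.Set.update st.2 (PySem.Dict.keys w.2))) (res, done)).1 := by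
  intro l
  induction l with
  | nil => intro res v e done _ _ _ _; rfl
  | cons st rest ih =>
    intro res v e done hvlen hl hEd hVd
    simp only [List.foldl_cons]
    obtain ⟨hst0, hstlt⟩ := hl st (by simp)
    have hC : pvClosed v.length e := by rw [hvlen]; exact hCP e done hEd
    have hN : pvNodeOK v.length e st := Or.inl (by rw [hvlen]; exact hstlt)
    obtain ⟨hres, hlen1, hlen2, hold, hnew, hmono, hpos⟩ :=
      pvWalk_sim Edge0 fuel st 0 v e done PySem.Dict.empty hst0 le_rfl hEd hVd hN hC
    rw [hres]
    have hemp : ∀ j : Int, ¬ (PySem.Dict.get? (PySem.Dict.empty (κ := Int) (ν := Int)) j).isSome := by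
      intro j; rw [PySem.Dict.get?_empty]; simp
    -- membership in the updated done set
    have hkeys : ∀ j : Nat, ((j : Int) ∈ PySem.Set.update done
        (PySem.Dict.keys (pvWalkB fuel Edge0 done PySem.Dict.empty st 0).2)) ↔
        ((j : Int) ∈ done ∨ (PySem.Dict.get? (pvWalkB fuel Edge0 done PySem.Dict.empty st 0).2 (j : Int)).isSome) := by
      intro j
      rw [PySem.Set.mem_update]
      constructor
      · rintro (h | h)
        · exact Or.inl h
        · refine Or.inr ?_
          rw [Option.isSome_iff_ne_none]
          intro hnone
          exact (PySem.Dict.get?_eq_none_iff_not_mem_keys _ _).mp hnone h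
      · rintro (h | h)
        · exact Or.inl h
        · refine Or.inr ?_
          by_contra hh
          rw [(PySem.Dict.get?_eq_none_iff_not_mem_keys _ _).mpr hh] at h
          simp at h
    apply ih
    · rw [hlen1, hvlen]
    · exact fun x hx => hl x (List.mem_cons_of_mem _ hx)
    · -- InvE is re-established with the enlarged done set
      intro j
      by_cases hnk : pvNewK PySem.Dict.empty (pvWalkB fuel Edge0 done PySem.Dict.empty st 0).2 (j : Int)
      · have h1 := hnew j hnk
        rw [h1.2, if_pos ((hkeys j).mpr (Or.inr hnk.1))]
        have hjlt : j < e.length := by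
          rw [← hlen2]
          exact pvLtOfSome h1.2
        have hEj := hEd j
        have h0some : Edge0[j]?.isSome := by
          by_contra hh
          rw [Option.not_isSome_iff_eq_none.mp hh] at hEj
          have hnone : e[j]? = none := by rw [hEj]; split <;> rfl
          rw [List.getElem?_eq_none_iff] at hnone
          omega
        obtain ⟨y, hy⟩ := Option.isSome_iff_exists.mp h0some
        rw [hy]
        rfl
      · have h1 := (hold j hnk).2
        have hnd : ((j : Int) ∈ PySem.Set.update done
            (PySem.Dict.keys (pvWalkB fuel Edge0 done PySem.Dict.empty st 0).2)) ↔ (j : Int) ∈ done := by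
          rw [hkeys j]
          constructor
          · rintro (h | h)
            · exact h
            · exact absurd ⟨h, hemp _⟩ hnk
          · exact Or.inl
        rw [h1, hEd j]
        by_cases hjd : (j : Int) ∈ done
        · rw [if_pos hjd, if_pos (hnd.mpr hjd)]
        · rw [if_neg hjd, if_neg (fun hh => hjd (hnd.mp hh))]
    · -- InvV is re-established with the enlarged done set and an empty dict
      intro j x hx
      refine ⟨?_, ?_⟩
      · rw [hkeys j]
        by_cases hnk : pvNewK PySem.Dict.empty (pvWalkB fuel Edge0 done PySem.Dict.empty st 0).2 (j : Int)
        · obtain ⟨⟨y, hy, hy0⟩, _⟩ := hnew j hnk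
          rw [hx] at hy
          obtain rfl : x = y := by injection hy
          exact ⟨fun _ => Or.inl (Or.inr hnk.1), fun _ => hy0⟩
        · rw [(hold j hnk).1] at hx
          have hv := (hVd j x hx).1
          constructor
          · intro h0
            rcases hv.mp h0 with h | h
            · exact Or.inl (Or.inl h)
            · exact absurd h (hemp _)
          · rintro (h | h)
            · rcases h with h | h
              · exact hv.mpr (Or.inl h)
              · exact absurd ⟨h, hemp _⟩ hnk
            · exact absurd h (hemp _)
      · intro p hp
        have : (PySem.Dict.get? (PySem.Dict.empty (κ := Int) (ν := Int)) (j : Int)).isSome := by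
          rw [hp]; rfl
        exact absurd this (hemp _)

-- ===== VERDICT (by name: the statement is the Claim_ definition above) =====
theorem largestSumCycle_spec : Claim_equal_largestSumCycle := by
  intro N Edge _ hpre
  unfold Spec_largestSumCycle
  simp only [largestSumCycle, largestSumCycle_alt]
  rw [pvFold_sim Edge (N.toNat + Edge.length + 1) N.toNat
    (fun e' d' hE => pvPre_closed N Edge hpre e' d' hE)
    (PySem.List.pyRange 0 N 1) [] (List.replicate N.toNat (-1)) Edge PySem.Set.empty
    (List.length_replicate)
    (by
      intro st hst
      rw [PySem.List.mem_pyRange_one] at hst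
      exact ⟨hst.1, by omega⟩)
    (by
      intro j
      rw [if_neg (by simp [PySem.Set.empty] : ¬ ((j : Int) ∈ (PySem.Set.empty : PySem.Set Int)))])
    (by
      intro j x hx
      rw [List.getElem?_replicate] at hx
      have hx1 : x = -1 := by
        by_cases hj : j < N.toNat
        · rw [if_pos hj] at hx; injection hx; omega
        · rw [if_neg hj] at hx; exact absurd hx (by simp)
      subst hx1
      refine ⟨⟨fun h => absurd h (by norm_num), ?_⟩, ?_⟩
      · rintro (h | h)
        · exact absurd h (by simp [PySem.Set.empty])
        · rw [PySem.Dict.get?_empty] at h; exact absurd h (by simp)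
      · intro p hp
        rw [PySem.Dict.get?_empty] at hp
        exact absurd hp (by simp))]
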